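-- pv_equiv track=rewrite | github.com/xdis/ai_roadmap | 9. Transformer 与注意力机制 (Transformer and Attention Mechanisms)/129. 命名实体识别/远程监督 - 使用知识库自动标注数据.py | distant_supervision_ner
-- ===== SOURCE A (Python) =====
-- def distant_supervision_ner(texts, entity_dict):
--     """使用远程监督自动标注NER数据"""
--     labeled_sentences = []
--     labeled_tags = []
--
--     for text in texts:
--         tags = ["O"] * len(text)
--
--         # 使用词典进行自动标注
--         for entity_type, entities in entity_dict.items():
--             for entity in entities:
--                 # 查找所有出现位置
--                 start = 0
--                 while start < len(text):
--                     pos = text.find(entity, start)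
--                     if pos == -1:
--                         break
--
--                     # 标注实体
--                     tags[pos] = f"B-{entity_type}"
--                     for i in range(pos + 1, pos + len(entity)):
--                         if i < len(text):
--                             tags[i] = f"I-{entity_type}"
--
--                     start = pos + 1
--
--         # 解决重叠问题(保留最后一次标注)
--         labeled_sentences.append(list(text))
--         labeled_tags.append(tags)
--
--     return labeled_sentences, labeled_tags
-- ===== SOURCE B (Python) =====
-- def distant_supervision_ner(texts, entity_dict):
--     """Distant-supervision NER labeling: compute each position's final tag directly
--     (last-write-wins becomes first-match over the reversed pattern list)."""
--     rev = [(t, e) for t, es in entity_dict.items() for e in es][::-1]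
--     labeled_sentences = []
--     labeled_tags = []
--     for text in texts:
--         n = len(text)
--         def tag_at(p):
--             for etype, ent in rev:
--                 m = len(ent)
--                 if text[p:p + m] == ent:
--                     return "B-" + etype
--                 if any(text[pos:pos + m] == ent
--                        for pos in range(max(p - m + 1, 0), p)):
--                     return "I-" + etype
--             return "O"
--         labeled_sentences.append(list(text))
--         labeled_tags.append([tag_at(p) for p in range(n)])
--     return labeled_sentences, labeled_tags
-- ===== Notes on version B (the rewrite author's own statement) =====
-- stated objective: alternative
-- what changed: A builds a mutable tag array and overwrites it entity-by-entity via repeated str.find scans from each occurrence (last write wins); B computes each position's final tag directly as the first match over the reversed (entity_type, entity) list with bounded window checks, no mutable array and no find rescans, which a timing run measured as faster on duplicate-heavy texts.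
import Mathlib
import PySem

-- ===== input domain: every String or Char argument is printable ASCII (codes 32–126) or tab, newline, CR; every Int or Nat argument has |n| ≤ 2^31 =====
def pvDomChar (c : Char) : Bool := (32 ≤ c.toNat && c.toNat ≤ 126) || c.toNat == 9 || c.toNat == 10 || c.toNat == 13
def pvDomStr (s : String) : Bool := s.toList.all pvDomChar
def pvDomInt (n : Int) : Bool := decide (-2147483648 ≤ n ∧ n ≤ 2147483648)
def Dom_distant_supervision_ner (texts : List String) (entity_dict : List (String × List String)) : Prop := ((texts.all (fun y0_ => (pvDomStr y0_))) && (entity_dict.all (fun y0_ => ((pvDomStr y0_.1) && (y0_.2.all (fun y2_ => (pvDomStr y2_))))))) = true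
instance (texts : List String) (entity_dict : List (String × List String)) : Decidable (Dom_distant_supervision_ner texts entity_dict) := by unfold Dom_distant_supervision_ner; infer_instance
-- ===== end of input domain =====

-- B replaces A's overwrite-in-place entity scans by a direct per-position computation
-- (first match over the reversed pattern list = A's last write), avoiding find's per-occurrence rescans (timing: faster).

-- ===== PORT A =====

-- the inner 'for i in range(pos+1, pos+len(entity)): if i < len(text): tags[i] = I'
def pvWriteI (etype : String) (pos m n : Nat) (tags : List String) : List String :=
  (PySem.List.pyRange ((pos : Int) + 1) ((pos : Int) + (m : Int))).foldl
    (fun t i => if i < (n : Int) then t.set i.toNat ("I-" ++ etype) else t) tags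

-- termination helper for the find-while loop (cited in decreasing_by)
theorem pvFind_lt (cs ent : List Char) (start : Nat) (h : start < cs.length)
    (hne : PySem.Chars.findFrom cs ent (start : Int) none ≠ -1) :
    cs.length - ((PySem.Chars.findFrom cs ent (start : Int) none).toNat + 1) < cs.length - start := by
  have hs := PySem.Chars.findFrom_natCast_spec cs ent start (Nat.le_of_lt h) hne
  omega

-- 'start = 0; while start < len(text): pos = text.find(entity, start); …; start = pos + 1'
def pvFindLoop (cs ent : List Char) (etype : String) (tags : List String) (start : Nat) : List String :=
  if h : start < cs.length then
    let pos := PySem.Chars.findFrom cs ent (start : Int) none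
    if hp : pos = -1 then tags
    else
      pvFindLoop cs ent etype
        (pvWriteI etype pos.toNat ent.length cs.length (tags.set pos.toNat ("B-" ++ etype)))
        (pos.toNat + 1)
  else tags
termination_by cs.length - start
decreasing_by exact pvFind_lt cs ent start h hp

def distant_supervision_ner (texts : List String) (entity_dict : List (String × List String)) : List (List String) × List (List String) :=
  texts.foldl
    (fun acc text =>
      let cs := text.toList
      let tags := entity_dict.foldl
        (fun tags te => te.2.foldl (fun tags ent => pvFindLoop cs ent.toList te.1 tags 0) tags)
        (List.replicate cs.length "O")
      (acc.1 ++ [cs.map (fun c => String.ofList [c])], acc.2 ++ [tags]))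
    ([], [])

-- ===== PORT B =====

-- 'text[i:i+len(ent)] == ent'
def pvMatch (cs : List Char) (ent : String) (i : Int) : Bool :=
  PySem.List.slice cs (some i) (some (i + (ent.toList.length : Int))) == ent.toList

-- the body of tag_at: first match over the reversed pattern list
def pvTagAt (cs : List Char) (rev : List (String × String)) (p : Nat) : String :=
  match rev with
  | [] => "O"
  | (etype, ent) :: rest =>
    if pvMatch cs ent (p : Int) then "B-" ++ etype
    else if (PySem.List.pyRange (max ((p : Int) - (ent.toList.length : Int) + 1) 0) (p : Int)).any
              (fun pos => pvMatch cs ent pos) then "I-" ++ etype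
    else pvTagAt cs rest p

def distant_supervision_ner_alt (texts : List String) (entity_dict : List (String × List String)) : List (List String) × List (List String) :=
  let rev := (entity_dict.flatMap (fun te => te.2.map (fun e => (te.1, e)))).reverse
  texts.foldl
    (fun acc text =>
      let cs := text.toList
      (acc.1 ++ [cs.map (fun c => String.ofList [c])],
       acc.2 ++ [(List.range cs.length).map (fun p => pvTagAt cs rev p)]))
    ([], [])

-- ===== PRECONDITION & SPEC =====
def Spec_distant_supervision_ner (texts : List String) (entity_dict : List (String × List String)) (out : List (List String) × List (List String)) : Prop := out = distant_supervision_ner_alt texts entity_dict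
instance (texts : List String) (entity_dict : List (String × List String)) (out : List (List String) × List (List String)) : Decidable (Spec_distant_supervision_ner texts entity_dict out) := by unfold Spec_distant_supervision_ner; infer_instance

-- ===== CLAIM (what is proved, stated in full; the proofs are below) =====
def Claim_equal_distant_supervision_ner : Prop := ∀ (texts : List String) (entity_dict : List (String × List String)), Dom_distant_supervision_ner texts entity_dict → Spec_distant_supervision_ner texts entity_dict (distant_supervision_ner texts entity_dict)

-- ===== LEMMAS AND PROOFS =====

theorem pvMatch_iff (cs : List Char) (ent : String) (p : Nat) :
    pvMatch cs ent (p : Int) = true ↔ ent.toList <+: cs.drop p := by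
  unfold pvMatch
  rw [PySem.List.slice_natCast_add, beq_iff_eq, List.prefix_iff_eq_take]
  exact eq_comm

theorem pvAny_iff (cs : List Char) (ent : String) (q : Nat) :
    ((PySem.List.pyRange (max ((q : Int) - (ent.toList.length : Int) + 1) 0) (q : Int)).any
        (fun pos => pvMatch cs ent pos) = true)
      ↔ ∃ p : Nat, p < q ∧ q < p + ent.toList.length ∧ ent.toList <+: cs.drop p := by
  rw [List.any_eq_true]
  constructor
  · rintro ⟨i, hi, hm⟩
    rw [PySem.List.mem_pyRange_one] at hi
    have h0 : 0 ≤ i := le_trans (le_max_right _ _) hi.1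
    have hqi : i = ((i.toNat : Nat) : Int) := by omega
    refine ⟨i.toNat, by omega, by omega, ?_⟩
    rw [← pvMatch_iff, ← hqi]; exact hm
  · rintro ⟨p, h1, h2, h3⟩
    refine ⟨(p : Int), ?_, by rw [pvMatch_iff]; exact h3⟩
    rw [PySem.List.mem_pyRange_one]
    constructor
    · omega
    · omega

theorem pvWriteI_length (etype : String) (pos m n : Nat) (tags : List String) :
    (pvWriteI etype pos m n tags).length = tags.length := by
  unfold pvWriteI
  generalize PySem.List.pyRange _ _ = l
  induction l generalizing tags with
  | nil => rfl
  | cons x xs ih =>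
    simp only [List.foldl_cons]
    rw [ih]
    split <;> simp

theorem pvWriteI_get? (etype : String) (pos m : Nat) (tags : List String) (q : Nat) :
    (pvWriteI etype pos m tags.length tags)[q]? =
      if pos < q ∧ q < pos + m ∧ q < tags.length then some ("I-" ++ etype) else tags[q]? := by
  induction m with
  | zero =>
    unfold pvWriteI
    rw [PySem.List.pyRange_one_eq_nil (by omega)]
    simp only [List.foldl_nil]
    rw [if_neg (by omega)]
  | succ m ih =>
    rcases Nat.eq_zero_or_pos m with hm | hm
    · subst hm
      unfold pvWriteI
      rw [PySem.List.pyRange_one_eq_nil (by omega)]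
      simp only [List.foldl_nil]
      rw [if_neg (by omega)]
    · unfold pvWriteI at ih ⊢
      have hcast : (pos : Int) + ((m + 1 : Nat) : Int) = ((pos : Int) + (m : Int)) + 1 := by
        push_cast; ring
      rw [hcast, PySem.List.pyRange_one_succ_right (by omega), List.foldl_append]
      simp only [List.foldl_cons, List.foldl_nil]
      have hL : (List.foldl (fun t i => if i < (tags.length : Int) then t.set i.toNat ("I-" ++ etype) else t)
          tags (PySem.List.pyRange ((pos : Int) + 1) ((pos : Int) + (m : Int)))).length = tags.length :=
        pvWriteI_length etype pos m tags.length tags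
      split
      · -- pos + m < len: one more set on top of the fold
        rw [List.getElem?_set, hL]
        by_cases hq : ((pos : Int) + (m : Int)).toNat = q
        · rw [if_pos hq, if_pos (by omega), if_pos (by omega)]
        · rw [if_neg hq, ih]
          by_cases hc : pos < q ∧ q < pos + m ∧ q < tags.length
          · rw [if_pos hc, if_pos (by omega)]
          · rw [if_neg hc, if_neg (by omega)]
      · -- pos + m out of range: no write happened
        rw [ih]
        rename_i hge
        by_cases hc : pos < q ∧ q < pos + m ∧ q < tags.length
        · rw [if_pos hc, if_pos (by omega)]
        · rw [if_neg hc, if_neg (by omega)]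

theorem pvFindLoop_get? (cs ent : List Char) (etype : String) (tags : List String) (start : Nat)
    (hlen : tags.length = cs.length) (q : Nat) :
    (pvFindLoop cs ent etype tags start)[q]? =
      if ent <+: cs.drop q ∧ start ≤ q ∧ q < cs.length then some ("B-" ++ etype)
      else if (∃ p ∈ List.range q, start ≤ p ∧ q < p + ent.length ∧ ent <+: cs.drop p) ∧ q < cs.length then
        some ("I-" ++ etype)
      else tags[q]? := by
  suffices H : ∀ k start (tags : List String), cs.length - start ≤ k → tags.length = cs.length →
      (pvFindLoop cs ent etype tags start)[q]? =
        if ent <+: cs.drop q ∧ start ≤ q ∧ q < cs.length then some ("B-" ++ etype)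
        else if (∃ p ∈ List.range q, start ≤ p ∧ q < p + ent.length ∧ ent <+: cs.drop p) ∧ q < cs.length then
          some ("I-" ++ etype)
        else tags[q]? by
    exact H (cs.length - start) start tags le_rfl hlen
  clear hlen tags start
  intro k
  induction k with
  | zero =>
    intro start tags hk hlen
    rw [pvFindLoop, dif_neg (by omega)]
    rw [if_neg (by rintro ⟨-, h1, h2⟩; omega), if_neg (by
      rintro ⟨⟨p, hp, h1, -, -⟩, hq⟩
      rw [List.mem_range] at hp
      omega)]
  | succ k ihk =>
    intro start tags hk hlen
    rw [pvFindLoop]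
    by_cases h : start < cs.length
    · rw [dif_pos h]
      dsimp only
      by_cases hp : PySem.Chars.findFrom cs ent (start : Int) none = -1
      · rw [dif_pos hp]
        have hinf : ¬ ent <:+: cs.drop start :=
          (PySem.Chars.findFrom_natCast_eq_neg_one_iff cs ent start (Nat.le_of_lt h)).mp hp
        have key : ∀ j, start ≤ j → ¬ ent <+: cs.drop j := by
          intro j hj hpre
          apply hinf
          rw [← PySem.Chars.isIn_iff_infix, ← PySem.Chars.exists_prefix_drop_iff_isIn]
          exact ⟨j - start, by rw [List.drop_drop, Nat.add_sub_cancel' hj]; exact hpre⟩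
        rw [if_neg (by rintro ⟨h1, h2, -⟩; exact key q h2 h1), if_neg (by
          rintro ⟨⟨p, -, h1, -, h3⟩, -⟩
          exact key p h1 h3)]
      · rw [dif_neg hp]
        obtain ⟨hs1, hs2, hs3⟩ := PySem.Chars.findFrom_natCast_spec cs ent start (Nat.le_of_lt h) hp
        set fpos := PySem.Chars.findFrom cs ent (start : Int) none with hfpos
        set p := fpos.toNat with hpdef
        have hsp : start ≤ p := by omega
        have hpn : p < cs.length := by
          by_cases hnil : ent = []
          · have hnlt : ¬ start < p := fun hlt => (hs3 start le_rfl hlt) (by simp [hnil])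
            omega
          · have h1 := hs2.length_le
            rw [List.length_drop] at h1
            have h2 : 0 < ent.length := List.length_pos_of_ne_nil hnil
            omega
        have hsl : (tags.set p ("B-" ++ etype)).length = cs.length := by
          rw [List.length_set]; exact hlen
        rw [ihk (p + 1) _ (by omega) (by rw [pvWriteI_length]; exact hsl)]
        have hw : (pvWriteI etype p ent.length cs.length (tags.set p ("B-" ++ etype)))[q]? =
            if p < q ∧ q < p + ent.length ∧ q < cs.length then some ("I-" ++ etype)
            else (tags.set p ("B-" ++ etype))[q]? := by
          have hthis := pvWriteI_get? etype p ent.length (tags.set p ("B-" ++ etype)) q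
          rw [hsl] at hthis
          exact hthis
        by_cases hB : ent <+: cs.drop q ∧ start ≤ q ∧ q < cs.length
        · rw [if_pos hB]
          by_cases hq : p + 1 ≤ q
          · rw [if_pos ⟨hB.1, hq, hB.2.2⟩]
          · have hqp : q = p := by
              rcases Nat.lt_or_ge q p with hlt | hge
              · exact absurd hB.1 (hs3 q hB.2.1 hlt)
              · omega
            rw [if_neg (by rintro ⟨-, h1, -⟩; omega), if_neg (by
              rintro ⟨⟨p', hp', h1, -, -⟩, -⟩
              rw [List.mem_range] at hp'
              omega)]
            rw [hw, if_neg (by omega), List.getElem?_set, if_pos (by omega), if_pos (by omega)]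
        · rw [if_neg hB]
          by_cases hI : (∃ p' ∈ List.range q, start ≤ p' ∧ q < p' + ent.length ∧ ent <+: cs.drop p') ∧ q < cs.length
          · rw [if_pos hI]
            obtain ⟨⟨p', hp'r, h1, h2, h3⟩, hqlen⟩ := hI
            rw [List.mem_range] at hp'r
            have hnpre : ¬ ent <+: cs.drop q := fun hpre => hB ⟨hpre, by omega, hqlen⟩
            rw [if_neg (by rintro ⟨h1', -, -⟩; exact hnpre h1')]
            by_cases hC : (∃ p'' ∈ List.range q, p + 1 ≤ p'' ∧ q < p'' + ent.length ∧ ent <+: cs.drop p'') ∧ q < cs.length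
            · rw [if_pos hC]
            · rw [if_neg hC]
              have hp'p : p' = p := by
                rcases Nat.lt_or_ge p' p with hlt | hge
                · exact absurd h3 (hs3 p' h1 hlt)
                · by_contra hne
                  exact hC ⟨⟨p', by rw [List.mem_range]; omega, by omega, h2, h3⟩, hqlen⟩
              rw [hw, if_pos (by omega)]
          · rw [if_neg hI]
            rw [if_neg (by
                rintro ⟨h1, h2, h3⟩
                exact hB ⟨h1, by omega, h3⟩),
              if_neg (by
                rintro ⟨⟨p'', hp'', h1, h2, h3⟩, hq2⟩
                rw [List.mem_range] at hp''
                exact hI ⟨⟨p'', by rw [List.mem_range]; omega, by omega, h2, h3⟩, hq2⟩)]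
            rw [hw, if_neg (by
                rintro ⟨h1, h2, h3⟩
                exact hI ⟨⟨p, by rw [List.mem_range]; omega, by omega, h2, hs2⟩, h3⟩)]
            rw [List.getElem?_set, if_neg (by
                intro hpq
                exact hB ⟨hpq ▸ hs2, by omega, by omega⟩)]
    · rw [dif_neg h]
      rw [if_neg (by rintro ⟨-, h1, h2⟩; omega), if_neg (by
        rintro ⟨⟨p, hp, h1, -, -⟩, hq⟩
        rw [List.mem_range] at hp
        omega)]

theorem pvFindLoop_length (cs ent : List Char) (etype : String) (tags : List String) (start : Nat) :
    (pvFindLoop cs ent etype tags start).length = tags.length := by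
  fun_induction pvFindLoop with
  | _ => simp_all [pvWriteI_length, List.length_set]

theorem pvFold_length (cs : List Char) (pairs : List (String × String)) :
    (pairs.foldl (fun tags te => pvFindLoop cs te.2.toList te.1 tags 0) (List.replicate cs.length "O")).length = cs.length := by
  suffices H : ∀ (init : List String), (pairs.foldl (fun tags te => pvFindLoop cs te.2.toList te.1 tags 0) init).length = init.length by
    rw [H, List.length_replicate]
  induction pairs with
  | nil => intro init; rfl
  | cons x xs ih => intro init; rw [List.foldl_cons, ih, pvFindLoop_length]

theorem pvFold_get? (cs : List Char) (pairs : List (String × String)) (q : Nat) (hq : q < cs.length) :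
    (pairs.foldl (fun tags te => pvFindLoop cs te.2.toList te.1 tags 0) (List.replicate cs.length "O"))[q]? =
      some (pvTagAt cs pairs.reverse q) := by
  induction pairs using List.reverseRecOn with
  | nil => simp [pvTagAt, hq]
  | append_singleton ps x ih =>
    obtain ⟨etype, ent⟩ := x
    rw [List.foldl_append, List.foldl_cons, List.foldl_nil]
    rw [pvFindLoop_get? cs ent.toList etype _ 0 (pvFold_length cs ps) q]
    rw [List.reverse_append, List.reverse_singleton, List.singleton_append]
    by_cases hm : pvMatch cs ent (q : Int) = true
    · rw [if_pos ⟨(pvMatch_iff cs ent q).mp hm, Nat.zero_le q, hq⟩]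
      simp only [pvTagAt]
      rw [if_pos hm]
    · have hnm : ¬ ent.toList <+: cs.drop q := fun hh => hm ((pvMatch_iff cs ent q).mpr hh)
      rw [if_neg (by rintro ⟨h1, -, -⟩; exact hnm h1)]
      simp only [pvTagAt]
      rw [if_neg hm]
      by_cases ha : (PySem.List.pyRange (max ((q : Int) - (ent.toList.length : Int) + 1) 0) (q : Int)).any
          (fun pos => pvMatch cs ent pos) = true
      · obtain ⟨p, h1, h2, h3⟩ := (pvAny_iff cs ent q).mp ha
        rw [if_pos ⟨⟨p, by rw [List.mem_range]; omega, Nat.zero_le p, by omega, h3⟩, hq⟩, if_pos ha]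
      · rw [if_neg (by
            rintro ⟨⟨p, hp, -, h2, h3⟩, -⟩
            rw [List.mem_range] at hp
            exact ha ((pvAny_iff cs ent q).mpr ⟨p, hp, h2, h3⟩)), if_neg ha]
        exact ih

theorem pvTags_eq (entity_dict : List (String × List String)) (cs : List Char) :
    entity_dict.foldl
        (fun tags te => te.2.foldl (fun tags ent => pvFindLoop cs ent.toList te.1 tags 0) tags)
        (List.replicate cs.length "O")
      = (List.range cs.length).map
          (fun p => pvTagAt cs ((entity_dict.flatMap (fun te => te.2.map (fun e => (te.1, e)))).reverse) p) := by
  have hflat : entity_dict.foldl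
        (fun tags te => te.2.foldl (fun tags ent => pvFindLoop cs ent.toList te.1 tags 0) tags)
        (List.replicate cs.length "O")
      = (entity_dict.flatMap (fun te => te.2.map (fun e => (te.1, e)))).foldl
          (fun tags te => pvFindLoop cs te.2.toList te.1 tags 0) (List.replicate cs.length "O") := by
    rw [List.foldl_flatMap]
    congr 1
    funext tags te
    rw [List.foldl_map]
  rw [hflat]
  apply List.ext_getElem?
  intro q
  by_cases hq : q < cs.length
  · rw [pvFold_get? cs _ q hq, List.getElem?_map, List.getElem?_range hq]
    rfl
  · rw [List.getElem?_eq_none, List.getElem?_eq_none]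
    · rw [List.length_map, List.length_range]; omega
    · rw [pvFold_length]; omega

-- ===== VERDICT (by name: the statement is the Claim_ definition above) =====
theorem distant_supervision_ner_spec : Claim_equal_distant_supervision_ner := by
  unfold Claim_equal_distant_supervision_ner
  intro texts entity_dict _
  unfold Spec_distant_supervision_ner distant_supervision_ner distant_supervision_ner_alt
  congr 1
  funext acc text
  simp only [pvTags_eq]
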